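-- pv_equiv track=rewrite | github.com/violet-burbank/Text-ID | TextID.py | makeSentenceLengths
-- ===== SOURCE A (Python) =====
-- def makeSentenceLengths (sentenceList):
--     """ returns a dictionary of sentences lengths and their frequencies """
--     sentenceDictionary = {}
--     for i in sentenceList:
--         if not (len(i) in list(sentenceDictionary.keys())):
--             sentenceDictionary[len(i)] = 1
--         else:
--             sentenceDictionary[len(i)] += 1
--
--     return sentenceDictionary
-- ===== SOURCE B (Python) =====
-- def makeSentenceLengths(sentenceList):
--     """ returns a dictionary of sentence lengths and their frequencies """
--     lengths = [len(s) for s in sentenceList]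
--     return {L: lengths.count(L) for L in dict.fromkeys(lengths)}
-- ===== Notes on version B (the rewrite author's own statement) =====
-- stated objective: faster
-- what changed: Replaces the incremental dict loop (which rebuilds list(d.keys()) for the membership test on every element) by a two-phase comprehension: compute the list of lengths once, deduplicate keys with dict.fromkeys (first-occurrence order), and count each distinct length with list.count.
import Mathlib
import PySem

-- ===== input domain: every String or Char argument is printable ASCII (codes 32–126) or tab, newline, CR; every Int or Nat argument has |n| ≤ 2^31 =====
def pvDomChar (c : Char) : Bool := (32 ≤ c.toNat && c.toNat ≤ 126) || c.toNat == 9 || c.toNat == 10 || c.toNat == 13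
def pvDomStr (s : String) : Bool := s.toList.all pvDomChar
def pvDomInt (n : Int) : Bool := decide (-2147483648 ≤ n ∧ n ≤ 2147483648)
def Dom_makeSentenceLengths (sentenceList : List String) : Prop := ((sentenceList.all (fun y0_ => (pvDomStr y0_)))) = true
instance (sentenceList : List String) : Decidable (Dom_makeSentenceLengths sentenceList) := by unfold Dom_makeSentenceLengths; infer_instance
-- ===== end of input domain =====

-- B replaces A's incremental membership-test-and-update dict loop by a two-phase
-- comprehension (dedup the length list, then count each distinct length), avoiding A's per-element list(keys) rebuild; a timing run measured B faster.

-- ===== PORT A =====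
-- A: loop over sentences; if len(i) not in list(dict.keys()) insert 1, else d[len(i)] += 1; return the dict.
def makeSentenceLengths (sentenceList : List String) : List (Int × Int) :=
  (sentenceList.foldl
    (fun d i =>
      if !((PySem.Dict.keys d).contains (PySem.Str.len i)) then
        d.insert (PySem.Str.len i) 1
      else
        d.insert (PySem.Str.len i) (d.getD (PySem.Str.len i) 0 + 1))
    (PySem.Dict.empty (κ := Int) (ν := Int))).items

-- ===== PORT B =====
-- B: lengths = [len(s) for s in sentenceList]; {L: lengths.count(L) for L in dict.fromkeys(lengths)}
def makeSentenceLengths_alt (sentenceList : List String) : List (Int × Int) :=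
  let lengths := sentenceList.map (fun s => PySem.Str.len s)
  (PySem.List.dedup lengths).map (fun L => (L, PySem.List.count lengths L))

-- ===== PRECONDITION & SPEC =====
def Spec_makeSentenceLengths (sentenceList : List String) (out : List (Int × Int)) : Prop := out = makeSentenceLengths_alt sentenceList
instance (sentenceList : List String) (out : List (Int × Int)) : Decidable (Spec_makeSentenceLengths sentenceList out) := by unfold Spec_makeSentenceLengths; infer_instance

-- ===== CLAIM (what is proved, stated in full; the proofs are below) =====
def Claim_equal_makeSentenceLengths : Prop := ∀ (sentenceList : List String), Dom_makeSentenceLengths sentenceList → Spec_makeSentenceLengths sentenceList (makeSentenceLengths sentenceList)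

-- ===== LEMMAS AND PROOFS =====

-- A's loop body collapses to the unconditional counter step: on a fresh key getD is 0.
theorem pv_step_eq (d : PySem.Dict Int Int) (k : Int) :
    (if !((PySem.Dict.keys d).contains k) then d.insert k 1
     else d.insert k (d.getD k 0 + 1)) = d.insert k (d.getD k 0 + 1) := by
  by_cases h : k ∈ PySem.Dict.keys d
  · simp [List.contains_eq_mem, h]
  · have hc : d.contains k = false := by
      have := PySem.Dict.contains_iff_mem_keys (d := d) (k := k)
      simp_all
    simp [List.contains_eq_mem, h, PySem.Dict.getD_of_not_contains d 0 hc]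

theorem makeSentenceLengths_eq_counter (sentenceList : List String) :
    makeSentenceLengths sentenceList =
      (PySem.Dict.counter (sentenceList.map (fun s => PySem.Str.len s))).items := by
  unfold makeSentenceLengths
  rw [← PySem.Dict.foldl_insert_getD_add_one_eq_counter, List.foldl_map]
  congr 1
  apply PySem.List.foldl_congr_mem
  intro acc x _
  exact pv_step_eq acc (PySem.Str.len x)

-- ===== VERDICT (by name: the statement is the Claim_ definition above) =====
theorem makeSentenceLengths_spec : Claim_equal_makeSentenceLengths := by
  intro sentenceList _
  unfold Spec_makeSentenceLengths makeSentenceLengths_alt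
  rw [makeSentenceLengths_eq_counter, PySem.Dict.items_counter]
  simp [PySem.List.dedup_eq_ofList, PySem.List.count_eq]
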